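-- pv_equiv track=rewrite | github.com/samuelcorralesc/programacion | 8_6.py | f
-- ===== SOURCE A (Python) =====
-- def f(x):
--
--
--
--     var=len(x)
--
--
--
--     conta=0
--
--
--     wi=[int(x) for x in x]
--
--
--     for i in range (1,6):
--
--
--
--         if i in wi:
--
--             conta+=1
--     if conta==5:
--
--
--         return True
--
--
--     return False
-- ===== SOURCE B (Python) =====
-- def f(x):
--     b1 = b2 = b3 = b4 = b5 = False
--     for v in x:
--         v = int(v)
--         if v == 1:
--             b1 = True
--         elif v == 2:
--             b2 = True
--         elif v == 3:
--             b3 = True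
--         elif v == 4:
--             b4 = True
--         elif v == 5:
--             b5 = True
--     return b1 and b2 and b3 and b4 and b5
-- ===== Notes on version B (the rewrite author's own statement) =====
-- stated objective: alternative
-- what changed: Instead of looping over the targets 1..5 and scanning the whole list for each, B makes a single pass over the input updating five presence flags and returns their conjunction.
import Mathlib
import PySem

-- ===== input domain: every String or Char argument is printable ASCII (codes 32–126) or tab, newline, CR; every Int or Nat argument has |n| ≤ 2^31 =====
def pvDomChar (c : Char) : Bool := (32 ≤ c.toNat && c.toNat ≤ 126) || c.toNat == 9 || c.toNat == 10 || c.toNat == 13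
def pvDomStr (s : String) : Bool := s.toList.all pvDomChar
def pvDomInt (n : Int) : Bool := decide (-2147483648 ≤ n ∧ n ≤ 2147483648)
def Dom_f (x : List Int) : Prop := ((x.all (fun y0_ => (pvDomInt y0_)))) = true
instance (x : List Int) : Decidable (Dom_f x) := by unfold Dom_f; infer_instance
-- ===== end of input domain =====

-- B replaces A's loop over targets 1..5 (each a membership scan of the list) with a
-- single pass over the input maintaining five presence flags (alternative; no speed claim).


-- ===== PORT A =====
-- var = len(x) is unused; int(x) on an int is the identity, kept as the map it is
def f (x : List Int) : Bool :=
  let _var := x.length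
  let conta : Int := 0
  let wi := x.map (fun y => y)
  let conta := (PySem.List.pyRange 1 6 1).foldl
    (fun c i => if wi.contains i then c + 1 else c) conta
  if conta = 5 then true else false

-- ===== PORT B =====
-- single pass: five flags updated per element, then their conjunction
def f_alt (x : List Int) : Bool :=
  let s := x.foldl
    (fun (s : Bool × Bool × Bool × Bool × Bool) v =>
      if v = 1 then (true, s.2.1, s.2.2.1, s.2.2.2.1, s.2.2.2.2)
      else if v = 2 then (s.1, true, s.2.2.1, s.2.2.2.1, s.2.2.2.2)
      else if v = 3 then (s.1, s.2.1, true, s.2.2.2.1, s.2.2.2.2)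
      else if v = 4 then (s.1, s.2.1, s.2.2.1, true, s.2.2.2.2)
      else if v = 5 then (s.1, s.2.1, s.2.2.1, s.2.2.2.1, true)
      else s)
    (false, false, false, false, false)
  s.1 && s.2.1 && s.2.2.1 && s.2.2.2.1 && s.2.2.2.2

-- ===== PRECONDITION & SPEC =====
def Spec_f (x : List Int) (out : Bool) : Prop := out = f_alt x
instance (x : List Int) (out : Bool) : Decidable (Spec_f x out) := by unfold Spec_f; infer_instance

-- ===== CLAIM (what is proved, stated in full; the proofs are below) =====
def Claim_equal_f : Prop := ∀ (x : List Int), Dom_f x → Spec_f x (f x)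

-- ===== LEMMAS AND PROOFS =====

-- The fold of B's step computes, in each component, "initial flag OR value occurs in x".
theorem f_alt_fold (x : List Int) (s : Bool × Bool × Bool × Bool × Bool) :
    x.foldl
      (fun (s : Bool × Bool × Bool × Bool × Bool) v =>
        if v = 1 then (true, s.2.1, s.2.2.1, s.2.2.2.1, s.2.2.2.2)
        else if v = 2 then (s.1, true, s.2.2.1, s.2.2.2.1, s.2.2.2.2)
        else if v = 3 then (s.1, s.2.1, true, s.2.2.2.1, s.2.2.2.2)
        else if v = 4 then (s.1, s.2.1, s.2.2.1, true, s.2.2.2.2)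
        else if v = 5 then (s.1, s.2.1, s.2.2.1, s.2.2.2.1, true)
        else s)
      s
    = (s.1 || x.contains 1, s.2.1 || x.contains 2, s.2.2.1 || x.contains 3,
       s.2.2.2.1 || x.contains 4, s.2.2.2.2 || x.contains 5) := by
  induction x generalizing s with
  | nil => simp
  | cons v t ih =>
    simp only [List.foldl_cons, ih]
    by_cases h1 : v = 1
    · subst h1; simp
    by_cases h2 : v = 2
    · subst h2; simp
    by_cases h3 : v = 3
    · subst h3; simp
    by_cases h4 : v = 4
    · subst h4; simp
    by_cases h5 : v = 5
    · subst h5; simp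
    simp [h1, h2, h3, h4, h5,
      Ne.symm h1, Ne.symm h2, Ne.symm h3, Ne.symm h4, Ne.symm h5]

-- ===== VERDICT (by name: the statement is the Claim_ definition above) =====
theorem f_spec : Claim_equal_f := by
  intro x _
  unfold Spec_f f f_alt
  simp only [List.map_id_fun', id]
  have hr : PySem.List.pyRange 1 6 1 = [1, 2, 3, 4, 5] := by decide
  rw [hr, f_alt_fold]
  simp only [List.foldl, Bool.false_or]
  by_cases c1 : x.contains 1 <;> by_cases c2 : x.contains 2 <;> by_cases c3 : x.contains 3 <;>
    by_cases c4 : x.contains 4 <;> by_cases c5 : x.contains 5 <;>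
    simp_all
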